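-- pv_equiv track=rewrite | github.com/Z3D-Panthee/verolis-pmv | z3d_demo.py | khor
-- ===== SOURCE A (Python) =====
-- def khor(n):
--     """Compression vers portes premières via +2Δ9"""
--     portes = []
--     while n > 1:
--         if n % 2 == 0:
--             n //= 2
--             if n in [2,3,5,7]: portes.append(n)
--         else:
--             n = n + 2  # Δ9 simplifié : +2
--             if n % 9 == 0: n //= 9
--     return portes
-- ===== SOURCE B (Python) =====
-- def khor(n):
--     """Compression vers portes premières via +2Δ9"""
--     if n <= 1:
--         return []
--     if n % 2 == 0:
--         m = n // 2
--         rest = khor(m)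
--         return [m] + rest if m in (2, 3, 5, 7) else rest
--     # collapse the whole +2 chain: smallest k in 1..9 with 9 | n+2k
--     k = (-5 * n) % 9 or 9
--     return khor((n + 2 * k) // 9)
-- ===== Notes on version B (the rewrite author's own statement) =====
-- stated objective: alternative
-- what changed: A is an iterative loop with an accumulator that advances an odd value by repeated plus-two steps, testing divisibility by nine each time; B is an accumulator-free recursion that builds the result list front-to-back and collapses each odd phase into a single closed-form modular jump to the quotient of the next multiple of nine.
import Mathlib
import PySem

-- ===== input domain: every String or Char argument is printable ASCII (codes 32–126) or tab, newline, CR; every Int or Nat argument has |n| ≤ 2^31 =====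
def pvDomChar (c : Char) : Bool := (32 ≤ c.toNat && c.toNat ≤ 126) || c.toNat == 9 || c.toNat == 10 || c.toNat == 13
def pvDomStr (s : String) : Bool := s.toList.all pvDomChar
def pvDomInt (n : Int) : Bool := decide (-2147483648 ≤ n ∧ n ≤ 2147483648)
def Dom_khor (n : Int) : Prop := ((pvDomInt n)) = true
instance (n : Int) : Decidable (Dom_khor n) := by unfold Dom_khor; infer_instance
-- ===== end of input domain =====

-- B replaces A's iterative accumulator loop (odd n advanced by one +2 step per iteration)
-- by an accumulator-free recursion that builds the list front-to-back and collapses each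
-- odd phase into one closed-form modular jump (objective: alternative).
-- Both ports use an explicit fuel argument only as a totality guard (the fuel is proved
-- sufficient below: the zero-fuel clause is reached only with n ≤ 1, where the loop stops).

-- fuel for A's loop: a measure that strictly decreases at every iteration of A
def pvMu (n : Int) : Nat :=
  (if n ≤ 1 then 0
   else if n % 2 = 0 then 16 * n + 640
   else 16 * (n + 2 * (if (-5 * n) % 9 = 0 then 9 else (-5 * n) % 9))
        + (if (-5 * n) % 9 = 0 then 9 else (-5 * n) % 9)).toNat

-- ===== PORT A =====
def khorGoA : Nat → Int → List Int → List Int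
  | 0, _, portes => portes
  | fuel + 1, n, portes =>
    if n ≤ 1 then portes
    else if PySem.Int.mod n 2 = 0 then
      let n' := PySem.Int.floordiv n 2
      khorGoA fuel n' (if n' ∈ ([2, 3, 5, 7] : List Int) then portes ++ [n'] else portes)
    else if PySem.Int.mod (n + 2) 9 = 0 then
      khorGoA fuel (PySem.Int.floordiv (n + 2) 9) portes
    else
      khorGoA fuel (n + 2) portes

def khor (n : Int) : List Int := khorGoA (pvMu n) n []

-- ===== PORT B =====
-- k = (-5*n) % 9 or 9
def pvK (n : Int) : Int :=
  if PySem.Int.mod (-5 * n) 9 = 0 then 9 else PySem.Int.mod (-5 * n) 9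

def khorRec : Nat → Int → List Int
  | 0, _ => []
  | fuel + 1, n =>
    if n ≤ 1 then []
    else if PySem.Int.mod n 2 = 0 then
      let m := PySem.Int.floordiv n 2
      let rest := khorRec fuel m
      if m ∈ ([2, 3, 5, 7] : List Int) then m :: rest else rest
    else
      khorRec fuel (PySem.Int.floordiv (n + 2 * pvK n) 9)

def khor_alt (n : Int) : List Int := khorRec n.toNat n

-- ===== PRECONDITION & SPEC =====
def Spec_khor (n : Int) (out : List Int) : Prop := out = khor_alt n
instance (n : Int) (out : List Int) : Decidable (Spec_khor n out) := by unfold Spec_khor; infer_instance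

-- ===== CLAIM (what is proved, stated in full; the proofs are below) =====
def Claim_equal_khor : Prop := ∀ (n : Int), Dom_khor n → Spec_khor n (khor n)

-- ===== LEMMAS AND PROOFS =====

theorem pvK_bounds (n : Int) : 1 ≤ pvK n ∧ pvK n ≤ 9 := by
  simp only [pvK, PySem.Int.mod_eq_emod_of_pos (show (0:Int) < 9 by norm_num)]
  split_ifs <;> omega

theorem pvMu_pos (n : Int) (h : ¬ n ≤ 1) : 1 ≤ pvMu n := by
  simp only [pvMu]; split_ifs <;> omega

theorem pvMu_dec_half (n : Int) (h1 : ¬ n ≤ 1) (h2 : PySem.Int.mod n 2 = 0) :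
    pvMu (PySem.Int.floordiv n 2) < pvMu n := by
  rw [PySem.Int.floordiv_eq_ediv_of_pos (by norm_num)]
  rw [PySem.Int.mod_eq_emod_of_pos (by norm_num)] at h2
  simp only [pvMu]; split_ifs <;> omega

theorem pvMu_dec_div9 (n : Int) (h1 : ¬ n ≤ 1) (h2 : ¬ PySem.Int.mod n 2 = 0)
    (h3 : PySem.Int.mod (n + 2) 9 = 0) : pvMu (PySem.Int.floordiv (n + 2) 9) < pvMu n := by
  rw [PySem.Int.floordiv_eq_ediv_of_pos (by norm_num)]
  rw [PySem.Int.mod_eq_emod_of_pos (by norm_num)] at h2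
  rw [PySem.Int.mod_eq_emod_of_pos (by norm_num)] at h3
  simp only [pvMu]; split_ifs <;> omega

theorem pvMu_dec_add2 (n : Int) (h1 : ¬ n ≤ 1) (h2 : ¬ PySem.Int.mod n 2 = 0)
    (h3 : ¬ PySem.Int.mod (n + 2) 9 = 0) : pvMu (n + 2) < pvMu n := by
  rw [PySem.Int.mod_eq_emod_of_pos (by norm_num)] at h2
  rw [PySem.Int.mod_eq_emod_of_pos (by norm_num)] at h3
  simp only [pvMu]; split_ifs <;> omega

theorem pvToNat_dec_half (n : Int) (h1 : ¬ n ≤ 1) :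
    (PySem.Int.floordiv n 2).toNat < n.toNat := by
  rw [PySem.Int.floordiv_eq_ediv_of_pos (by norm_num)]; omega

theorem pvToNat_dec_jump (n : Int) (h1 : ¬ n ≤ 1) (h2 : ¬ PySem.Int.mod n 2 = 0) :
    (PySem.Int.floordiv (n + 2 * pvK n) 9).toNat < n.toNat := by
  rw [PySem.Int.floordiv_eq_ediv_of_pos (by norm_num)]
  rw [PySem.Int.mod_eq_emod_of_pos (by norm_num)] at h2
  have hk := pvK_bounds n
  omega

-- along a +2 step the target multiple of 9 is invariant
theorem pvK_shift (n : Int) (h3 : ¬ (n + 2) % 9 = 0) :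
    n + 2 + 2 * pvK (n + 2) = n + 2 * pvK n := by
  simp only [pvK, PySem.Int.mod_eq_emod_of_pos (show (0:Int) < 9 by norm_num)]
  split_ifs <;> omega

-- when A divides (9 | n+2), B's k is 1
theorem pvK_div (n : Int) (h3 : (n + 2) % 9 = 0) : pvK n = 1 := by
  simp only [pvK, PySem.Int.mod_eq_emod_of_pos (show (0:Int) < 9 by norm_num)]
  split_ifs <;> omega

-- B's recursion ignores extra fuel: any fuel ≥ n.toNat (a bound on its call depth) gives the same value
theorem khorRec_fuel (f : Nat) : ∀ (g : Nat) (n : Int),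
    n.toNat ≤ f → n.toNat ≤ g → khorRec f n = khorRec g n := by
  induction f with
  | zero =>
    intro g n hf hg
    have hn : n ≤ 1 := by omega
    cases g with
    | zero => rfl
    | succ g => simp [khorRec, hn]
  | succ f ih =>
    intro g n hf hg
    by_cases hn : n ≤ 1
    · cases g with
      | zero => simp [khorRec, hn]
      | succ g => simp [khorRec, hn]
    · cases g with
      | zero => omega
      | succ g =>
        simp only [khorRec, if_neg hn]
        by_cases h2 : PySem.Int.mod n 2 = 0
        · simp only [if_pos h2]
          have hd := pvToNat_dec_half n hn
          rw [ih g (PySem.Int.floordiv n 2) (by omega) (by omega)]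
        · simp only [if_neg h2]
          have hd := pvToNat_dec_jump n hn h2
          exact ih _ _ (by omega) (by omega)

theorem go_eq (f : Nat) : ∀ (n : Int) (acc : List Int),
    pvMu n ≤ f → khorGoA f n acc = acc ++ khorRec n.toNat n := by
  induction f with
  | zero =>
    intro n acc hf
    have hn : n ≤ 1 := by
      by_contra h
      have := pvMu_pos n h
      omega
    cases hm : n.toNat with
    | zero => simp [khorGoA, khorRec]
    | succ m => simp [khorGoA, khorRec, hn]
  | succ f ih =>
    intro n acc hf
    by_cases hn : n ≤ 1
    · cases hm : n.toNat with
      | zero => simp [khorGoA, khorRec, hn]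
      | succ m => simp [khorGoA, khorRec, hn]
    · obtain ⟨m, hm⟩ : ∃ m, n.toNat = m + 1 := ⟨n.toNat - 1, by omega⟩
      rw [hm]
      simp only [khorGoA, khorRec, if_neg hn]
      by_cases h2 : PySem.Int.mod n 2 = 0
      · -- even branch: A appends to the accumulator, B conses in front of the recursive result
        simp only [if_pos h2]
        have hd := pvMu_dec_half n hn h2
        have hd' := pvToNat_dec_half n hn
        rw [ih _ _ (by omega)]
        rw [khorRec_fuel m _ _ (by omega) le_rfl]
        split_ifs <;> simp
      · have h2' : ¬ n % 2 = 0 := by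
          rwa [PySem.Int.mod_eq_emod_of_pos (by norm_num)] at h2
        simp only [if_neg h2]
        by_cases h3 : PySem.Int.mod (n + 2) 9 = 0
        · -- A divides by 9 this step; B's k = 1 jumps to the same value
          have h3' : (n + 2) % 9 = 0 := by
            rwa [PySem.Int.mod_eq_emod_of_pos (by norm_num)] at h3
          simp only [if_pos h3]
          have hd := pvMu_dec_div9 n hn h2 h3
          have hd' := pvToNat_dec_jump n hn h2
          rw [pvK_div n h3'] at hd' ⊢
          have he : n + 2 * 1 = n + 2 := by ring
          rw [he] at hd' ⊢
          rw [ih _ _ (by omega)]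
          rw [khorRec_fuel m _ _ (by omega) le_rfl]
        · -- A takes one +2 step; B's closed-form target is invariant under that step
          have h3' : ¬ (n + 2) % 9 = 0 := by
            rwa [PySem.Int.mod_eq_emod_of_pos (by norm_num)] at h3
          simp only [if_neg h3]
          have hd := pvMu_dec_add2 n hn h2 h3
          rw [ih _ _ (by omega)]
          -- unfold B one step at n+2: it is odd and > 1, so it jumps to the same target
          have hodd2 : ¬ PySem.Int.mod (n + 2) 2 = 0 := by
            rw [PySem.Int.mod_eq_emod_of_pos (by norm_num)]; omega
          obtain ⟨p, hp⟩ : ∃ p, (n + 2).toNat = p + 1 := ⟨(n + 2).toNat - 1, by omega⟩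
          rw [hp]
          simp only [khorRec, if_neg (show ¬ (n + 2 ≤ 1) by omega), if_neg hodd2]
          rw [pvK_shift n h3']
          have hd' := pvToNat_dec_jump n hn h2
          rw [khorRec_fuel p m _ (by omega) (by omega)]

-- ===== VERDICT (by name: the statement is the Claim_ definition above) =====
theorem khor_spec : Claim_equal_khor := by
  intro n _
  unfold Spec_khor khor khor_alt
  simpa using go_eq (pvMu n) n [] le_rfl
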